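-- pv_equiv track=rewrite | github.com/geekdojo-io/programming-challenges | teamscode/spring_2019_mihs/6_secret_letter_strings.py | solve
-- ===== SOURCE A (Python) =====
-- def solve(s):
--     prev, cnt = '', 0
--     res = ''
--     for c in s:
--         if prev == c:
--             cnt += 1
--         elif c in 'abcd':
--             if cnt > 1:
--                 res += (prev * (cnt - 1))
--             prev = c
--             cnt = 1
--         else:
--             prev = ''
--             cnt = 0
--             res += ' ' if c == '.' else c
--     return res
-- ===== SOURCE B (Python) =====
-- def solve(s):
--     # pass 1: split s into maximal equal-character runs (char, length)
--     runs = []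
--     i, n = 0, len(s)
--     while i < n:
--         j = i + 1
--         while j < n and s[j] == s[i]:
--             j += 1
--         runs.append((s[i], j - i))
--         i = j
--     # pass 2: emit per run, peeking at the next run
--     parts = []
--     for k, (ch, L) in enumerate(runs):
--         if ch in 'abcd':
--             if k + 1 < len(runs) and runs[k + 1][0] in 'abcd':
--                 parts.append(ch * (L - 1))
--         else:
--             parts.append((' ' if ch == '.' else ch) * L)
--     return ''.join(parts)
-- ===== Notes on version B (the rewrite author's own statement) =====
-- stated objective: alternative
-- what changed: Replaces A's single-pass prev/cnt state machine with a two-pass algorithm: first split the string into maximal equal-character runs, then emit each run by peeking at the next run's character, joining the pieces at the end.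
import Mathlib
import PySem

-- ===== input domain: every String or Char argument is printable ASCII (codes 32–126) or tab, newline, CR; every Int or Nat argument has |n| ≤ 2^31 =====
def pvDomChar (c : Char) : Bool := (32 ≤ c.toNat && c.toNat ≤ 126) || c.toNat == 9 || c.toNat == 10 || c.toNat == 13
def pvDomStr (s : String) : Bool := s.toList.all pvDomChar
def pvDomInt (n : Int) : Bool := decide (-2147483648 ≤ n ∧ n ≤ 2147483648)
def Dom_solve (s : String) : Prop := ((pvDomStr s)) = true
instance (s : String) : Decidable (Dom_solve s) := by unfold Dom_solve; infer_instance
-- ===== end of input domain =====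

-- B rebuilds the output from a precomputed list of maximal runs with lookahead at the next run
-- (two passes) instead of A's single-pass prev/cnt state machine; objective: alternative.

-- `c in 'abcd'` for a single character (shared character test, mirrors the Python literal)
def inAbcd (c : Char) : Bool := c == 'a' || c == 'b' || c == 'c' || c == 'd'

-- ===== PORT A =====
-- state: prev is Python's string prev ([] = ''), cnt, res the accumulated output
def solveLoop : List Char → List Char → Nat → List Char → List Char
  | [], _, _, res => res
  | c :: cs, prev, cnt, res =>
    if prev = [c] then
      solveLoop cs prev (cnt + 1) res
    else if inAbcd c then
      solveLoop cs [c] 1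
        (if cnt > 1 then res ++ (List.replicate (cnt - 1) prev).flatten else res)
    else
      solveLoop cs [] 0 (res ++ [if c = '.' then ' ' else c])

def solve (s : String) : String := String.mk (solveLoop s.toList [] 0 [])

-- ===== PORT B =====
-- pass 1 of Source B: maximal equal-character runs (the inner while-scan is takeWhile/dropWhile)
def runsOf : List Char → List (Char × Nat)
  | [] => []
  | c :: cs => (c, (cs.takeWhile (· == c)).length + 1) :: runsOf (cs.dropWhile (· == c))
  termination_by l => l.length
  decreasing_by
    simpa using Nat.lt_succ_of_le (List.length_dropWhile_le (· == c) cs)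

-- pass 2 of Source B: emit per run, peeking at the next run (runs[k+1])
def emitRuns : List (Char × Nat) → List Char
  | [] => []
  | (ch, L) :: rest =>
    (if inAbcd ch then
       match rest with
       | (ch2, _) :: _ => if inAbcd ch2 then List.replicate (L - 1) ch else []
       | [] => []
     else
       List.replicate L (if ch = '.' then ' ' else ch)) ++ emitRuns rest

def solve_alt (s : String) : String := String.mk (emitRuns (runsOf s.toList))

-- ===== PRECONDITION & SPEC =====
def Spec_solve (s : String) (out : String) : Prop := out = solve_alt s
instance (s : String) (out : String) : Decidable (Spec_solve s out) := by unfold Spec_solve; infer_instance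

-- ===== CLAIM (what is proved, stated in full; the proofs are below) =====
def Claim_equal_solve : Prop := ∀ (s : String), Dom_solve s → Spec_solve s (solve s)

-- ===== LEMMAS AND PROOFS =====

-- the accumulator is only ever appended to
lemma solveLoop_acc (l : List Char) : ∀ (prev : List Char) (cnt : Nat) (res : List Char),
    solveLoop l prev cnt res = res ++ solveLoop l prev cnt [] := by
  induction l with
  | nil => intro prev cnt res; simp [solveLoop]
  | cons c cs ih =>
    intro prev cnt res
    by_cases h1 : prev = [c]
    · rw [solveLoop, solveLoop, if_pos h1, if_pos h1, ih prev (cnt + 1) res]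
    · by_cases h2 : inAbcd c = true
      · rw [solveLoop, solveLoop, if_neg h1, if_neg h1, if_pos h2, if_pos h2]
        by_cases h3 : cnt > 1
        · rw [if_pos h3, if_pos h3, ih [c] 1 (res ++ (List.replicate (cnt - 1) prev).flatten),
              ih [c] 1 ([] ++ (List.replicate (cnt - 1) prev).flatten)]
          simp
        · rw [if_neg h3, if_neg h3, ih [c] 1 res]
      · rw [solveLoop, solveLoop, if_neg h1, if_neg h1, if_neg h2, if_neg h2,
            ih [] 0 (res ++ [if c = '.' then ' ' else c]), ih [] 0 ([] ++ [if c = '.' then ' ' else c])]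
        simp

-- string repetition prev * (cnt-1) on a singleton "string"
lemma flatten_replicate_singleton (m : Nat) (p : Char) :
    (List.replicate m [p]).flatten = List.replicate m p := by
  induction m with
  | zero => simp
  | succ k ih => simp [List.replicate_succ, ih]

-- a non-abcd character contributes itself (or ' ' for '.') and the rest restarts fresh
lemma emit_cons_nonabcd (c : Char) (cs : List Char) (hc : inAbcd c = false) :
    emitRuns (runsOf (c :: cs)) = (if c = '.' then ' ' else c) :: emitRuns (runsOf cs) := by
  cases cs with
  | nil => simp [runsOf, emitRuns, hc]
  | cons d ds =>
    by_cases hdc : d = c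
    · subst hdc
      simp only [runsOf, List.takeWhile_cons, List.dropWhile_cons, BEq.rfl, if_true]
      simp [emitRuns, hc, List.replicate_succ]
    · have hbeq : (d == c) = false := by simp [hdc]
      rw [runsOf]
      simp only [List.takeWhile_cons, List.dropWhile_cons, hbeq, Bool.false_eq_true, if_false,
        List.length_nil]
      simp [emitRuns, hc]

-- from a fresh state an abcd-headed list produces exactly the runs output, given the in-run IH for its tail
lemma step_abcd (c : Char) (cs : List Char) (hc : inAbcd c = true)
    (h2 : solveLoop cs [c] 1 [] =
      (match cs.dropWhile (· == c) with
       | c2 :: _ => if inAbcd c2 then List.replicate (1 + (cs.takeWhile (· == c)).length - 1) c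
                    else ([] : List Char)
       | [] => []) ++ emitRuns (runsOf (cs.dropWhile (· == c)))) :
    solveLoop cs [c] 1 [] = emitRuns (runsOf (c :: cs)) := by
  rw [h2, runsOf]
  cases hl' : cs.dropWhile (· == c) with
  | nil => simp [emitRuns, runsOf, hc]
  | cons c2 t =>
    have harith : 1 + (List.takeWhile (fun x => x == c) cs).length - 1
        = (List.takeWhile (fun x => x == c) cs).length := by omega
    rw [runsOf]
    simp [emitRuns, hc, harith]

-- main invariant: combined statement for the fresh state and an in-run abcd state
lemma solveLoop_runs : ∀ (n : Nat) (l : List Char), l.length ≤ n →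
    (solveLoop l [] 0 [] = emitRuns (runsOf l)) ∧
    (∀ (p : Char) (cnt : Nat), inAbcd p = true → 1 ≤ cnt →
      solveLoop l [p] cnt [] =
        (match l.dropWhile (· == p) with
         | c :: _ => if inAbcd c then List.replicate (cnt + (l.takeWhile (· == p)).length - 1) p
                     else ([] : List Char)
         | [] => []) ++ emitRuns (runsOf (l.dropWhile (· == p)))) := by
  intro n
  induction n with
  | zero =>
    intro l hl
    have : l = [] := List.eq_nil_of_length_eq_zero (Nat.le_zero.mp hl)
    subst this
    exact ⟨by simp [solveLoop, runsOf, emitRuns], by intro p cnt _ _; simp [solveLoop, emitRuns, runsOf]⟩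
  | succ n ih =>
    intro l hl
    cases l with
    | nil =>
      exact ⟨by simp [solveLoop, runsOf, emitRuns], by intro p cnt _ _; simp [solveLoop, emitRuns, runsOf]⟩
    | cons c cs =>
      have hcs : cs.length ≤ n := by simpa using hl
      constructor
      · -- fresh state
        by_cases hc : inAbcd c = true
        · rw [solveLoop, if_neg (by simp), if_pos hc, if_neg (by omega)]
          exact step_abcd c cs hc ((ih cs hcs).2 c 1 hc le_rfl)
        · rw [solveLoop, if_neg (by simp), if_neg hc, solveLoop_acc, (ih cs hcs).1,
            emit_cons_nonabcd c cs (by simpa using hc)]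
          simp
      · -- in-run state [p], cnt
        intro p cnt hp hcnt
        by_cases hpc : c = p
        · subst hpc
          rw [solveLoop, if_pos rfl, (ih cs hcs).2 c (cnt + 1) hp (by omega)]
          simp only [List.takeWhile_cons, List.dropWhile_cons, BEq.rfl, if_true]
          cases hl' : cs.dropWhile (· == c) with
          | nil => simp
          | cons c2 t =>
            have harith : cnt + 1 + (List.takeWhile (fun x => x == c) cs).length - 1
                = cnt + ((List.takeWhile (fun x => x == c) cs).length + 1) - 1 := by omega
            simp only [List.length_cons, harith]
        · have hpc' : p ≠ c := fun h => hpc h.symm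
          have hne : ([p] : List Char) ≠ [c] := by simpa using hpc'
          have htw : List.takeWhile (fun x => x == p) (c :: cs) = [] := by
            simp [hpc]
          have hdw : List.dropWhile (fun x => x == p) (c :: cs) = c :: cs := by
            simp [hpc]
          by_cases hc : inAbcd c = true
          · have hmain : solveLoop (c :: cs) [p] cnt [] =
                List.replicate (cnt - 1) p ++ solveLoop cs [c] 1 [] := by
              rw [solveLoop, if_neg (by simpa [eq_comm] using hne), if_pos hc]
              by_cases h3 : cnt > 1
              · rw [if_pos h3, solveLoop_acc, flatten_replicate_singleton]
                simp
              · have h4 : cnt = 1 := by omega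
                subst h4
                rw [if_neg h3]
                simp
            rw [hmain, step_abcd c cs hc ((ih cs hcs).2 c 1 hc le_rfl), hdw, htw]
            simp [hc]
          · rw [solveLoop, if_neg (by simpa [eq_comm] using hne), if_neg hc,
              solveLoop_acc, (ih cs hcs).1, hdw, htw,
              emit_cons_nonabcd c cs (by simpa using hc)]
            simp [hc]

theorem solve_spec : Claim_equal_solve := by
  intro s _
  unfold Spec_solve solve solve_alt
  exact congrArg String.mk (solveLoop_runs s.toList.length s.toList le_rfl).1
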